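-- pv_equiv track=rewrite | github.com/fralar-code/Compression-data-algorithms | src/RE_PAIR/re_pair.py | most_frequent_pair
-- ===== SOURCE A (Python) =====
-- from collections import defaultdict
--
-- def most_frequent_pair(sequence):
--     # We create a dictionary that will have the symbol pair as the key and the value as the occurrences of the digram
--     pair_count = defaultdict(int)
--     i = 0
--
--     while i < len(sequence) - 1:
--         pair = (sequence[i], sequence[i+1])
--         pair_count[pair] += 1
--         # check if there is an overlap
--         if (i+2)< len(sequence) and sequence[i] == sequence[i+1] and sequence[i+1] == sequence[i+2]:
--             # We increase by 2 so that the overlap is considered only once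
--             i += 2
--         else:
--             i += 1
--
--     if not pair_count:
--         return None
--     # We return the pair with higher occurrence
--     max_key = max(pair_count, key = pair_count.get)
--     return (max_key, pair_count[max_key])
-- ===== SOURCE B (Python) =====
-- def most_frequent_pair(sequence):
--     # Run-length decomposition: each run of symbol x with length L contributes
--     # L // 2 occurrences of the pair (x, x) (overlap-aware), and each boundary
--     # between a run of prev and a run of x contributes one occurrence of (prev, x).
--     runs = []
--     for s in sequence:
--         if runs and runs[-1][0] == s:
--             runs[-1][1] += 1
--         else:
--             runs.append([s, 1])
--
--     pair_count = {}
--     prev = None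
--     for x, length in runs:
--         if prev is not None:
--             pair_count[(prev, x)] = pair_count.get((prev, x), 0) + 1
--         if length >= 2:
--             pair_count[(x, x)] = pair_count.get((x, x), 0) + length // 2
--         prev = x
--
--     if not pair_count:
--         return None
--     max_key = max(pair_count, key=pair_count.get)
--     return (max_key, pair_count[max_key])
-- ===== Notes on version B (the rewrite author's own statement) =====
-- stated objective: alternative
-- what changed: A's index-skipping while loop (with the ad-hoc i+=2 overlap skip) is replaced by a run-length encoding pass followed by a per-run counting pass: each run of x of length L contributes L//2 to (x,x) and each run boundary contributes 1 to the boundary pair, preserving A's insertion order and tie-break.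
import Mathlib
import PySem

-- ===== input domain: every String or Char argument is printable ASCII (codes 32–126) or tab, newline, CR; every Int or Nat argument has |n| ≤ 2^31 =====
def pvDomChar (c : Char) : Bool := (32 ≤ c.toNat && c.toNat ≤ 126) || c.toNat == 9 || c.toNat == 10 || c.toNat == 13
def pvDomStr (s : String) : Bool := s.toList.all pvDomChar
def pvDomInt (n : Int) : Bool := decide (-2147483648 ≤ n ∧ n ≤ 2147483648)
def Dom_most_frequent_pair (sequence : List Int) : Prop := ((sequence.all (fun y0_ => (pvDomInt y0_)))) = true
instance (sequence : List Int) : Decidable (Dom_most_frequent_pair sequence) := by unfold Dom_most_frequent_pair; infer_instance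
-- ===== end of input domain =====

-- B replaces A's index-skipping while loop by a run-length decomposition plus a
-- per-run counting pass (alternative decomposition, same cost).

-- ===== PORT A =====
-- A's while loop over index i, transcribed as recursion on the suffix starting at i:
-- 'a' is sequence[i], 'b' is sequence[i+1], 'c' (head of rest) is sequence[i+2];
-- 'i += 2' continues on rest, 'i += 1' continues on b :: rest.
def pvALoop : List Int → PySem.Dict (Int × Int) Int → PySem.Dict (Int × Int) Int
  | a :: b :: rest, d =>
    let d' := d.modify (a, b) 0 (· + 1)          -- pair_count[pair] += 1 (defaultdict)
    match rest with
    | c :: _ => if a = b ∧ b = c then pvALoop rest d' else pvALoop (b :: rest) d'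
    | [] => d'
  | _, d => d

def most_frequent_pair (sequence : List Int) : Option ((Int × Int) × Int) :=
  let pair_count := pvALoop sequence PySem.Dict.empty
  if pair_count.items.isEmpty then none
  else
    match PySem.List.max? pair_count.keys (fun k => pair_count.getD k 0) with
    | some max_key => some (max_key, pair_count.getD max_key 0)
    | none => none    -- unreachable: keys nonempty

-- ===== PORT B =====
-- runs.append([s,1]) / runs[-1][1] += 1, one foldl step per element
def pvRleStep (runs : List (Int × Int)) (s : Int) : List (Int × Int) :=
  match runs.getLast? with
  | some (x, k) => if x = s then runs.dropLast ++ [(x, k + 1)] else runs ++ [(s, 1)]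
  | none => [(s, 1)]

-- the counting loop's body; state is (pair_count, prev)
def pvBStep (st : PySem.Dict (Int × Int) Int × Option Int) (r : Int × Int) :
    PySem.Dict (Int × Int) Int × Option Int :=
  let d₁ := match st.2 with
    | some p => st.1.insert (p, r.1) (st.1.getD (p, r.1) 0 + 1)
    | none => st.1
  let d₂ := if 2 ≤ r.2 then d₁.insert (r.1, r.1) (d₁.getD (r.1, r.1) 0 + PySem.Int.floordiv r.2 2)
            else d₁
  (d₂, some r.1)

def most_frequent_pair_alt (sequence : List Int) : Option ((Int × Int) × Int) :=
  let runs := sequence.foldl pvRleStep []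
  let pair_count := (runs.foldl pvBStep (PySem.Dict.empty, none)).1
  if pair_count.items.isEmpty then none
  else
    match PySem.List.max? pair_count.keys (fun k => pair_count.getD k 0) with
    | some max_key => some (max_key, pair_count.getD max_key 0)
    | none => none    -- unreachable: keys nonempty

-- ===== PRECONDITION & SPEC =====
def Spec_most_frequent_pair (sequence : List Int) (out : Option ((Int × Int) × Int)) : Prop := out = most_frequent_pair_alt sequence
instance (sequence : List Int) (out : Option ((Int × Int) × Int)) : Decidable (Spec_most_frequent_pair sequence out) := by unfold Spec_most_frequent_pair; infer_instance

-- ===== CLAIM (what is proved, stated in full; the proofs are below) =====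
def Claim_equal_most_frequent_pair : Prop := ∀ (sequence : List Int), Dom_most_frequent_pair sequence → Spec_most_frequent_pair sequence (most_frequent_pair sequence)

-- ===== LEMMAS AND PROOFS =====

-- A's counter bump, named for the proofs
def pvAdd1 (p : Int × Int) (d : PySem.Dict (Int × Int) Int) : PySem.Dict (Int × Int) Int :=
  d.modify p 0 (· + 1)

theorem pv_modify_eq_insert (d : PySem.Dict (Int × Int) Int) (p : Int × Int) (v0 : Int)
    (f : Int → Int) : d.modify p v0 f = d.insert p (f (d.getD p v0)) :=
  PySem.Dict.ext_iff.mpr rfl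

-- k iterated +1 bumps = one insert of getD + k (k ≥ 1)
theorem pv_iter_add1 (p : Int × Int) : ∀ (k : Nat) (d : PySem.Dict (Int × Int) Int), 1 ≤ k →
    (pvAdd1 p)^[k] d = d.insert p (d.getD p 0 + (k : Int)) := by
  intro k
  induction k with
  | zero => omega
  | succ k ih =>
    intro d _
    rcases Nat.eq_zero_or_pos k with hk | hk
    · subst hk
      simp [pvAdd1, pv_modify_eq_insert]
    · rw [Function.iterate_succ_apply, ih _ hk]
      have h1 : pvAdd1 p d = d.insert p (d.getD p 0 + 1) := pv_modify_eq_insert d p 0 _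
      rw [h1, PySem.Dict.getD_insert_self, PySem.Dict.insert_insert_self]
      congr 1
      push_cast
      ring

-- ---- A-side run lemmas ----
theorem pvALoop_two (x : Int) : ∀ (n : Nat) (d : PySem.Dict (Int × Int) Int),
    pvALoop (List.replicate (n + 2) x) d = pvALoop (List.replicate n x) (pvAdd1 (x, x) d) := by
  intro n d
  cases n with
  | zero => simp [pvALoop, pvAdd1]
  | succ m =>
    show pvALoop (x :: x :: List.replicate (m + 1) x) d = _
    simp [pvALoop, List.replicate_succ, pvAdd1]

theorem pvALoop_rep (x : Int) : ∀ (L : Nat) (d : PySem.Dict (Int × Int) Int),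
    pvALoop (List.replicate L x) d = (pvAdd1 (x, x))^[L / 2] d := by
  intro L
  induction L using Nat.strong_induction_on with
  | _ L ih =>
    intro d
    match L with
    | 0 => simp [pvALoop]
    | 1 => simp [pvALoop]
    | (n + 2) =>
      rw [pvALoop_two, ih n (by omega)]
      have : (n + 2) / 2 = n / 2 + 1 := by omega
      rw [this, Function.iterate_succ_apply]

theorem pvALoop_run (x y : Int) (hxy : y ≠ x) : ∀ (L : Nat) (t : List Int)
    (d : PySem.Dict (Int × Int) Int), 1 ≤ L →
    pvALoop (List.replicate L x ++ y :: t) d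
      = pvALoop (y :: t) (pvAdd1 (x, y) ((pvAdd1 (x, x))^[L / 2] d)) := by
  intro L
  induction L using Nat.strong_induction_on with
  | _ L ih =>
    intro t d hL
    match L with
    | 1 =>
      cases t with
      | nil => simp [pvALoop, pvAdd1]
      | cons c t' => simp [pvALoop, pvAdd1, (Ne.symm hxy : ¬ x = y)]
    | 2 =>
      cases t with
      | nil =>
        simp [pvALoop, pvAdd1, (Ne.symm hxy : ¬ x = y)]
      | cons c t' =>
        simp [pvALoop, pvAdd1, (Ne.symm hxy : ¬ x = y)]
    | (n + 3) =>
      have h2 : pvALoop (List.replicate (n + 3) x ++ y :: t) d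
          = pvALoop (List.replicate (n + 1) x ++ y :: t) (pvAdd1 (x, x) d) := by
        show pvALoop (x :: x :: (List.replicate (n + 1) x ++ y :: t)) d = _
        simp [pvALoop, List.replicate_succ, pvAdd1]
      rw [h2, ih (n + 1) (by omega) t _ (by omega)]
      have h3 : (n + 3) / 2 = (n + 1) / 2 + 1 := by omega
      rw [h3, Function.iterate_succ_apply]

-- ---- B-side run-length lemmas ----
def pvRleF (x : Int) (k : Int) : List Int → List (Int × Int)
  | [] => [(x, k)]
  | s :: l => if x = s then pvRleF x (k + 1) l else (x, k) :: pvRleF s 1 l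

theorem pvRuns_eq : ∀ (l : List Int) (rs : List (Int × Int)) (x : Int) (k : Int),
    l.foldl pvRleStep (rs ++ [(x, k)]) = rs ++ pvRleF x k l := by
  intro l
  induction l with
  | nil => intro rs x k; simp [pvRleF]
  | cons s l ih =>
    intro rs x k
    rw [List.foldl_cons]
    by_cases h : x = s
    · have : pvRleStep (rs ++ [(x, k)]) s = rs ++ [(x, k + 1)] := by
        simp [pvRleStep, h]
      rw [this, ih, pvRleF, if_pos h]
    · have : pvRleStep (rs ++ [(x, k)]) s = (rs ++ [(x, k)]) ++ [(s, 1)] := by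
        simp [pvRleStep, h]
      rw [this, ih, pvRleF, if_neg h, List.append_assoc, List.singleton_append]

theorem pvRuns_spec (x : Int) (l : List Int) :
    (x :: l).foldl pvRleStep [] = pvRleF x 1 l := by
  have := pvRuns_eq l [] x 1
  simpa [pvRleStep] using this

theorem pvRleF_rep (x : Int) : ∀ (m : Nat) (k : Int),
    pvRleF x k (List.replicate m x) = [(x, k + m)] := by
  intro m
  induction m with
  | zero => intro k; simp [pvRleF]
  | succ n ih =>
    intro k
    rw [List.replicate_succ, pvRleF, if_pos rfl, ih]
    congr 2
    push_cast; ring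

theorem pvRleF_rep_cons (x y : Int) (hxy : y ≠ x) : ∀ (m : Nat) (k : Int) (t : List Int),
    pvRleF x k (List.replicate m x ++ y :: t) = (x, k + m) :: pvRleF y 1 t := by
  intro m
  induction m with
  | zero => intro k t; simp [pvRleF, Ne.symm hxy]
  | succ n ih =>
    intro k t
    rw [List.replicate_succ, List.cons_append, pvRleF, if_pos rfl, ih]
    have h : k + 1 + (n : Int) = k + ((n + 1 : Nat) : Int) := by push_cast; ring
    rw [h]

theorem pvRleF_head (y : Int) : ∀ (t : List Int) (k : Int),
    ∃ k' rest, pvRleF y k t = (y, k') :: rest := by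
  intro t
  induction t with
  | nil => intro k; exact ⟨k, [], rfl⟩
  | cons s l ih =>
    intro k
    by_cases h : y = s
    · obtain ⟨k', rest, hr⟩ := ih (k + 1)
      exact ⟨k', rest, by rw [pvRleF, if_pos h, hr]⟩
    · exact ⟨k, pvRleF s 1 l, by rw [pvRleF, if_neg h]⟩

-- a pending prev is absorbed into the dict when at least one run remains
theorem pv_prev_shift (x p : Int) (L : Int) (R : List (Int × Int))
    (d : PySem.Dict (Int × Int) Int) :
    ((x, L) :: R).foldl pvBStep (d, some p)
      = ((x, L) :: R).foldl pvBStep (d.insert (p, x) (d.getD (p, x) 0 + 1), none) := by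
  rw [List.foldl_cons, List.foldl_cons]
  rfl

-- the run contribution of B's step equals A's iterated bumps
theorem pv_run_add (x : Int) (m : Nat) (d : PySem.Dict (Int × Int) Int) :
    (if 2 ≤ (1 + (m : Int)) then
        d.insert (x, x) (d.getD (x, x) 0 + PySem.Int.floordiv (1 + (m : Int)) 2)
      else d)
      = (pvAdd1 (x, x))^[(m + 1) / 2] d := by
  cases m with
  | zero => simp
  | succ n =>
    rw [if_pos (by push_cast; omega)]
    have h1 : (1 + ((n + 1 : Nat) : Int)) = (((n + 2 : Nat) : Int)) := by push_cast; ring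
    have h2 : PySem.Int.floordiv ((n + 2 : Nat) : Int) 2 = (((n + 2) / 2 : Nat) : Int) := by
      exact_mod_cast PySem.Int.floordiv_natCast (n + 2) 2
    rw [h1, h2, pv_iter_add1 (x, x) ((n + 1 + 1) / 2) d (by omega)]

-- ---- main: both loops build the same dict ----
theorem pv_main : ∀ (n : Nat) (seq : List Int) (d : PySem.Dict (Int × Int) Int),
    seq.length ≤ n →
    pvALoop seq d = ((seq.foldl pvRleStep []).foldl pvBStep (d, none)).1 := by
  intro n
  induction n with
  | zero =>
    intro seq d h
    have : seq = [] := List.eq_nil_of_length_eq_zero (by omega)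
    subst this
    simp [pvALoop]
  | succ n ih =>
    intro seq d h
    match seq with
    | [] => simp [pvALoop]
    | x :: l =>
      have hrep : l.takeWhile (· == x) = List.replicate (l.takeWhile (· == x)).length x := by
        apply List.eq_replicate_of_mem
        intro b hb
        have := List.mem_takeWhile_imp hb
        simpa using this
      have hsplit : l = List.replicate (l.takeWhile (· == x)).length x ++ l.dropWhile (· == x) := by
        conv_lhs => rw [← List.takeWhile_append_dropWhile (p := (· == x)) (l := l)]
        rw [hrep]
        simp
      set m := (l.takeWhile (· == x)).length with hm
      have hseq : x :: l = List.replicate (m + 1) x ++ l.dropWhile (· == x) := by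
        rw [List.replicate_succ, List.cons_append, ← hsplit]
      rw [pvRuns_spec x l]
      cases ht : l.dropWhile (· == x) with
      | nil =>
        rw [ht] at hseq hsplit
        rw [List.append_nil] at hseq
        rw [List.append_nil] at hsplit
        rw [hseq, pvALoop_rep, hsplit, pvRleF_rep]
        rw [List.foldl_cons, List.foldl_nil]
        show _ = (pvBStep (d, none) (x, 1 + (m : Int))).1
        rw [← pv_run_add x m d]
        rfl
      | cons y t' =>
        have hyx : y ≠ x := by
          have h2 := List.head_dropWhile_not (· == x) (l := l) (by simp [ht])
          have h3 : (l.dropWhile (· == x)).head (by simp [ht]) = y := by simp [ht]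
          rw [h3] at h2
          simpa using h2
        rw [ht] at hseq hsplit
        rw [hseq, pvALoop_run x y hyx (m + 1) t' d (by omega)]
        rw [hsplit, pvRleF_rep_cons x y hyx, List.foldl_cons]
        have hstep : pvBStep (d, none) (x, 1 + (m : Int)) = ((pvAdd1 (x, x))^[(m + 1) / 2] d, some x) := by
          rw [← pv_run_add x m d]
          rfl
        rw [hstep]
        set d1 := (pvAdd1 (x, x))^[(m + 1) / 2] d with hd1
        obtain ⟨k', rest, hhead⟩ := pvRleF_head y t' 1
        rw [hhead, pv_prev_shift, ← hhead]
        have hins : d1.insert (x, y) (d1.getD (x, y) 0 + 1) = pvAdd1 (x, y) d1 :=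
          (pv_modify_eq_insert d1 (x, y) 0 (· + 1)).symm
        rw [hins, ← pvRuns_spec y t']
        apply ih (y :: t')
        have hlen : l.length = m + (y :: t').length := by
          rw [hsplit]; simp
        simp at h
        simp only [List.length_cons] at hlen ⊢
        omega

-- ===== VERDICT (by name: the statement is the Claim_ definition above) =====
theorem most_frequent_pair_spec : Claim_equal_most_frequent_pair := by
  intro seq _
  unfold Spec_most_frequent_pair most_frequent_pair most_frequent_pair_alt
  rw [pv_main seq.length seq PySem.Dict.empty le_rfl]
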